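-- pv_equiv track=rewrite | github.com/MemoFlux/MemoFluxServer | src/utils/text_splitter.py | greedy_text_splitter
-- ===== SOURCE A (Python) =====
-- from typing import List, Set
--
-- def greedy_text_splitter(
--     text: str, max_length: int, punctuation: Set[str] = set()
-- ) -> List[str]:
--     """
--     使用贪婪算法进行文本分割。
--
--     优先在标点符号处分割，确保每个分段不超过`max_length`。
--     如果在`max_length`的窗口内找不到标点，则进行硬分割。
--
--     Args:
--         text (str): 需要分割的原始文本。
--         max_length (int): 每个分段的最大长度（字符数）。
--         punctuation (Set[str], optional):
--             用于分割的标点符号集合。如果为 None，则使用默认的中英文标点。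
--
--     Returns:
--         List[str]: 分割后的文本段落列表。
--     """
--     if not punctuation:
--         # 默认使用常见的中英文标点
--         punctuation = {"。", "！", "？", "……", "；", "，", ".", "!", "?", ";", ","}
--
--     if not text:
--         return []
--
--     # 先去除文本首尾的空白字符
--     text = text.strip()
--
--     if len(text) <= max_length:
--         # 对于短文本，移除末尾的标点符号
--         if text and text[-1] in punctuation:
--             return [text[:-1].strip()]
--         return [text]
--
--     segments = []
--     current_pos = 0
--
--     while current_pos < len(text):
--         # 确定下一次搜索的窗口末尾位置
--         # min()确保我们不会超出文本的总长度
--         end_pos = min(current_pos + max_length, len(text))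
--
--         # 如果剩余文本不再需要分割，直接添加并结束
--         if end_pos == len(text):
--             segment = text[current_pos:]
--             # 移除末尾的标点符号
--             if segment and segment[-1] in punctuation:
--                 segment = segment[:-1]
--             segments.append(segment.strip())
--             break
--
--         split_pos = -1
--         split_char_pos = -1
--
--         # 贪婪策略：从窗口末尾向前搜索最后一个标点符号
--         # range(end_pos, current_pos, -1) 表示从 end_pos-1 到 current_pos
--         for i in range(end_pos, current_pos, -1):
--             # 注意索引是从0开始的，所以是 i-1
--             if text[i - 1] in punctuation:
--                 split_pos = i  # 分割点在标点符号之后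
--                 split_char_pos = i - 1  # 标点符号的位置
--                 break
--
--         # 根据是否找到标点来决定如何分割
--         if split_pos != -1:
--             # 情况一：找到了标点，就在标点处分割（但不包含标点符号）
--             segment = text[current_pos:split_char_pos]  # 不包含标点符号本身
--             current_pos = split_pos
--         else:
--             # 情况二：未找到标点，执行硬分割
--             segment = text[current_pos:end_pos]
--             current_pos = end_pos
--
--         # 使用strip()去除分段前后可能存在的空白字符
--         segment = segment.strip()
--         if segment:  # 只添加非空段落
--             # 如果段落末尾有标点符号，移除它
--             if segment and segment[-1] in punctuation:
--                 segment = segment[:-1].strip()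
--             if segment:  # 再次检查是否为空
--                 segments.append(segment)
--
--     # 过滤掉可能产生的空字符串
--     return [s for s in segments if s]
-- ===== SOURCE B (Python) =====
-- from typing import List, Set
--
-- def greedy_text_splitter(
--     text: str, max_length: int, punctuation: Set[str] = set()
-- ) -> List[str]:
--     """Greedy split at punctuation within max-length windows.
--
--     Staged re-implementation: (1) one forward pass records, for every index,
--     the position of the last punctuation char at or before it; (2) a boundary
--     pass computes the raw (start, stop) window pairs from that table; (3) the
--     segments are sliced, cleaned and filtered in a final comprehension.
--     """
--     punct = punctuation or {"。", "！", "？", "……", "；", "，", ".", "!", "?", ";", ","}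
--     if not text:
--         return []
--     text = text.strip()
--     n = len(text)
--     if n <= max_length:
--         if text and text[-1] in punct:
--             return [text[:-1].strip()]
--         return [text]
--
--     # pass 1: prev[j] = index of the last punctuation char at or before j, else -1
--     prev = []
--     last = -1
--     for j, ch in enumerate(text):
--         if ch in punct:
--             last = j
--         prev.append(last)
--
--     # pass 2: window boundaries (start, stop) — stop excludes the punctuation char
--     cuts = []
--     cur = 0
--     while cur < n:
--         stop = cur + max_length
--         if stop >= n:
--             break
--         p = prev[stop - 1]
--         if p >= cur:
--             cuts.append((cur, p))
--             cur = p + 1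
--         else:
--             cuts.append((cur, stop))
--             cur = stop
--
--     # pass 3: slice, clean, filter
--     def clean(seg):
--         seg = seg.strip()
--         if seg and seg[-1] in punct:
--             seg = seg[:-1].strip()
--         return seg
--
--     tail = text[cur:]
--     if tail and tail[-1] in punct:
--         tail = tail[:-1]
--     tail = tail.strip()
--     segs = [clean(text[a:b]) for a, b in cuts] + [tail]
--     return [s for s in segs if s]
-- ===== Notes on version B (the rewrite author's own statement) =====
-- stated objective: alternative
-- what changed: A's fused while-loop with a backward punctuation scan per window is replaced by three staged passes: a forward last-punctuation-position table, a boundary pass that only computes (start, stop) index pairs, and a final comprehension that slices, cleans and filters the segments.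
import Mathlib
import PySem

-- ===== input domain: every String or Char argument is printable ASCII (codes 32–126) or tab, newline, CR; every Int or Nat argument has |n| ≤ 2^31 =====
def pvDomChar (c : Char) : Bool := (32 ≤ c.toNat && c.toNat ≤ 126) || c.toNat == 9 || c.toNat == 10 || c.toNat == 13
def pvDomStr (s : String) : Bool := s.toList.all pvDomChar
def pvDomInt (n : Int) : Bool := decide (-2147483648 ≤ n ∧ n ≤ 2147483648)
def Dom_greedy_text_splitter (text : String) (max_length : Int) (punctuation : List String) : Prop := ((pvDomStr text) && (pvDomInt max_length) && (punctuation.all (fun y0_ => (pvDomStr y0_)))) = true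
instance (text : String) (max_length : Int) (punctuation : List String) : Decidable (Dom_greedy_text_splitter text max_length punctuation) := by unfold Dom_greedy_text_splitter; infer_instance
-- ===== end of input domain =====

-- B replaces A's fused window loop (backward punctuation scan + cleaning inside the loop)
-- by three staged passes: a last-punctuation-position table, a boundary pass producing
-- (start, stop) pairs, and a final slice/clean/filter comprehension (objective: alternative).

-- default punctuation set used by both Pythons when the argument is empty
def pvDefaultPunct : List String := ["。", "！", "？", "……", "；", "，", ".", "!", "?", ";", ","]

-- ===== PORT A =====

-- 'if segment and segment[-1] in punctuation: segment = segment[:-1]'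
def pvCutPunct (pcs : List (List Char)) (seg : List Char) : List Char :=
  match seg.getLast? with
  | some c => if pcs.contains [c] then seg.dropLast else seg
  | none => seg

-- 'segment = segment.strip(); if segment: if segment[-1] in punctuation: segment = segment[:-1].strip(); if segment: segments.append(segment)'
def pvA_push (pcs : List (List Char)) (segs : List (List Char)) (seg0 : List Char) : List (List Char) :=
  let s1 := PySem.Chars.strip seg0
  if s1 = [] then segs
  else
    let s2 := match s1.getLast? with
      | some c => if pcs.contains [c] then PySem.Chars.strip s1.dropLast else s1
      | none => s1
    if s2 = [] then segs else segs ++ [s2]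

-- 'for i in range(end_pos, current_pos, -1): if text[i-1] in punctuation: split_pos = i; break'
def pvA_findSplit (t : List Char) (pcs : List (List Char)) (cur : Nat) : Nat → Option Nat
  | 0 => none
  | i+1 =>
    if cur < i+1 then
      if pcs.contains [t.getD i ' '] then some (i+1) else pvA_findSplit t pcs cur i
    else none

-- the 'while current_pos < len(text)' loop (fuel bounds the iterations; A diverges
-- exactly where Pre_ is false, so the fuel is never exhausted on admitted inputs)
def pvA_loop (t : List Char) (pcs : List (List Char)) (ml : Int) :
    Nat → Nat → List (List Char) → List (List Char)
  | 0, _, segs => segs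
  | fuel+1, cur, segs =>
    if cur < t.length then
      let endPos : Nat := (min ((cur : Int) + ml) (t.length : Int)).toNat
      if endPos = t.length then
        segs ++ [PySem.Chars.strip (pvCutPunct pcs (PySem.List.slice t (some (cur : Int)) none))]
      else
        match pvA_findSplit t pcs cur endPos with
        | some i =>
          pvA_loop t pcs ml fuel i
            (pvA_push pcs segs (PySem.List.slice t (some (cur : Int)) (some ((i : Int) - 1))))
        | none =>
          pvA_loop t pcs ml fuel endPos
            (pvA_push pcs segs (PySem.List.slice t (some (cur : Int)) (some (endPos : Int))))
    else segs

def greedy_text_splitter (text : String) (max_length : Int) (punctuation : List String) : List String :=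
  let punct := if punctuation.isEmpty then pvDefaultPunct else punctuation
  let pcs := punct.map String.toList
  if text.toList = [] then []
  else
    let t := PySem.Chars.strip text.toList
    if (t.length : Int) ≤ max_length then
      match t.getLast? with
      | some c =>
        if pcs.contains [c] then [String.ofList (PySem.Chars.strip t.dropLast)] else [String.ofList t]
      | none => [String.ofList t]
    else
      -- 'return [s for s in segments if s]'
      ((pvA_loop t pcs max_length (t.length + 1) 0 []).filter (fun s => !s.isEmpty)).map String.ofList

-- ===== PORT B =====

-- pass 1: 'last = -1; for j, ch in enumerate(text): if ch in punct: last = j; prev.append(last)'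
def pvB_prev (t : List Char) (pcs : List (List Char)) : List Int :=
  (t.zipIdx.foldl
    (fun (st : List Int × Int) (p : Char × Nat) =>
      let last := if pcs.contains [p.1] then (p.2 : Int) else st.2
      (st.1 ++ [last], last))
    ([], -1)).1

-- pass 2: the boundary loop; returns (cuts, final cur).  'prev[stop-1]' is in range
-- for every input admitted by Pre_ (1 ≤ max_length); outside Pre_ nothing is claimed.
def pvB_cuts (t : List Char) (prev : List Int) (ml : Int) :
    Nat → Nat → List (Nat × Int) → List (Nat × Int) × Nat
  | 0, cur, acc => (acc, cur)
  | fuel+1, cur, acc =>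
    if cur < t.length then
      if (t.length : Int) ≤ (cur : Int) + ml then (acc, cur)
      else
        let p := prev.getD (((cur : Int) + ml - 1).toNat) (-1)
        if (cur : Int) ≤ p then
          pvB_cuts t prev ml fuel (p.toNat + 1) (acc ++ [(cur, p)])
        else
          pvB_cuts t prev ml fuel (((cur : Int) + ml).toNat) (acc ++ [(cur, (cur : Int) + ml)])
    else (acc, cur)

-- pass 3 helper: 'seg = seg.strip(); if seg and seg[-1] in punct: seg = seg[:-1].strip(); return seg'
def pvClean (pcs : List (List Char)) (s0 : List Char) : List Char :=
  let s1 := PySem.Chars.strip s0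
  match s1.getLast? with
  | some c => if pcs.contains [c] then PySem.Chars.strip s1.dropLast else s1
  | none => s1

def greedy_text_splitter_alt (text : String) (max_length : Int) (punctuation : List String) : List String :=
  let punct := if punctuation.isEmpty then pvDefaultPunct else punctuation
  let pcs := punct.map String.toList
  if text.toList = [] then []
  else
    let t := PySem.Chars.strip text.toList
    if (t.length : Int) ≤ max_length then
      match t.getLast? with
      | some c =>
        if pcs.contains [c] then [String.ofList (PySem.Chars.strip t.dropLast)] else [String.ofList t]
      | none => [String.ofList t]
    else
      let cf := pvB_cuts t (pvB_prev t pcs) max_length (t.length + 1) 0 []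
      -- 'tail = text[cur:]; if tail and tail[-1] in punct: tail = tail[:-1]; tail = tail.strip()'
      let tail := PySem.Chars.strip (pvCutPunct pcs (t.drop cf.2))
      let segs := (cf.1.map (fun ab => pvClean pcs (PySem.List.slice t (some (ab.1 : Int)) (some ab.2)))) ++ [tail]
      (segs.filter (fun s => !s.isEmpty)).map String.ofList

-- ===== PRECONDITION & SPEC =====
-- Pre_ excludes exactly the inputs on which A never returns: when the stripped text is
-- nonempty and max_length ≤ 0, A's while-loop makes no progress and diverges.
def Pre_greedy_text_splitter (text : String) (max_length : Int) (punctuation : List String) : Prop :=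
  1 ≤ max_length ∨ PySem.Chars.strip text.toList = []
instance (text : String) (max_length : Int) (punctuation : List String) : Decidable (Pre_greedy_text_splitter text max_length punctuation) := by unfold Pre_greedy_text_splitter; infer_instance

def pvWitness_greedy_text_splitter : String × Int × List String := ("ab, cd. ef", 4, [])

def Spec_greedy_text_splitter (text : String) (max_length : Int) (punctuation : List String) (out : List String) : Prop := out = greedy_text_splitter_alt text max_length punctuation
instance (text : String) (max_length : Int) (punctuation : List String) (out : List String) : Decidable (Spec_greedy_text_splitter text max_length punctuation out) := by unfold Spec_greedy_text_splitter; infer_instance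

-- ===== CLAIM (what is proved, stated in full; the proofs are below) =====
def Claim_equal_greedy_text_splitter : Prop := ∀ (text : String) (max_length : Int) (punctuation : List String), Dom_greedy_text_splitter text max_length punctuation → Pre_greedy_text_splitter text max_length punctuation → Spec_greedy_text_splitter text max_length punctuation (greedy_text_splitter text max_length punctuation)

-- ===== LEMMAS AND PROOFS =====

-- the punctuation test at position k
def pvIsP (t : List Char) (pcs : List (List Char)) (k : Nat) : Bool := pcs.contains [t.getD k ' ']

-- specification value: index of the last punctuation character at or before j, else -1
def pvLast (t : List Char) (pcs : List (List Char)) : Nat → Int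
  | 0 => if pvIsP t pcs 0 then 0 else -1
  | j+1 => if pvIsP t pcs (j+1) then ((j : Int) + 1) else pvLast t pcs j

theorem pvLast_le (t : List Char) (pcs : List (List Char)) (j : Nat) :
    pvLast t pcs j ≤ (j : Int) := by
  induction j with
  | zero => unfold pvLast; split <;> omega
  | succ j ih => unfold pvLast; split <;> omega

theorem pvA_findSplit_eq (t : List Char) (pcs : List (List Char)) (cur i : Nat)
    (h : cur < i) :
    pvA_findSplit t pcs cur i =
      if (cur : Int) ≤ pvLast t pcs (i - 1) then some ((pvLast t pcs (i - 1)).toNat + 1)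
      else none := by
  induction i with
  | zero => omega
  | succ m ih =>
    have hstep : pvA_findSplit t pcs cur (m+1) =
        if pvIsP t pcs m = true then some (m+1) else pvA_findSplit t pcs cur m := by
      simp only [pvA_findSplit, if_pos h]; rfl
    rw [hstep, Nat.add_sub_cancel]
    by_cases hp : pvIsP t pcs m = true
    · rw [if_pos hp]
      have hl : pvLast t pcs m = (m : Int) := by
        cases m with
        | zero => simp [pvLast, hp]
        | succ k => simp [pvLast, hp]
      rw [hl, if_pos (show (cur : Int) ≤ (m : Int) by exact_mod_cast Nat.le_of_lt_succ h)]
      norm_num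
    · rw [if_neg hp]
      cases m with
      | zero =>
        have hc0 : cur = 0 := by omega
        subst hc0
        have hl : pvLast t pcs 0 = -1 := by simp [pvLast, hp]
        rw [show pvA_findSplit t pcs 0 0 = none from rfl, hl, if_neg (by omega)]
      | succ k =>
        have hl : pvLast t pcs (k+1) = pvLast t pcs k := by
          simp [pvLast, hp]
        rw [hl]
        by_cases hc : cur < k + 1
        · rw [ih hc, Nat.add_sub_cancel]
        · have hck : cur = k + 1 := by omega
          subst hck
          have hnone : pvA_findSplit t pcs (k+1) (k+1) = none := by
            cases k with
            | zero => rfl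
            | succ j => simp only [pvA_findSplit, if_neg (by omega : ¬ (j+1+1 < j+1+1))]
          rw [hnone, if_neg (by have := pvLast_le t pcs k; omega)]

-- scan form of the prev-building fold
def pvScan (pcs : List (List Char)) (last : Int) : List (Char × Nat) → List Int
  | [] => []
  | p :: rest =>
    (if pcs.contains [p.1] then (p.2 : Int) else last) ::
      pvScan pcs (if pcs.contains [p.1] then (p.2 : Int) else last) rest

theorem pvB_prev_foldl (pcs : List (List Char)) :
    ∀ (l : List (Char × Nat)) (acc : List Int) (last : Int),
      (l.foldl
        (fun (st : List Int × Int) (p : Char × Nat) =>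
          let v := if pcs.contains [p.1] then (p.2 : Int) else st.2
          (st.1 ++ [v], v)) (acc, last)).1 = acc ++ pvScan pcs last l := by
  intro l
  induction l with
  | nil => simp [pvScan]
  | cons p rest ih =>
    intro acc last
    simp only [List.foldl_cons, pvScan]
    rw [ih]
    simp

theorem pvScan_append (pcs : List (List Char)) :
    ∀ (l : List (Char × Nat)) (last : Int) (p : Char × Nat),
      pvScan pcs last (l ++ [p]) =
        pvScan pcs last l ++
          [if pcs.contains [p.1] then (p.2 : Int) else (pvScan pcs last l).getLastD last] := by
  intro l
  induction l with
  | nil => simp [pvScan]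
  | cons q rest ih =>
    intro last p
    simp only [List.cons_append, pvScan, ih, List.getLastD_cons]

theorem pvLast_append (t : List Char) (c : Char) (pcs : List (List Char)) (j : Nat)
    (h : j < t.length) : pvLast (t ++ [c]) pcs j = pvLast t pcs j := by
  have hIs : ∀ k, k < t.length → pvIsP (t ++ [c]) pcs k = pvIsP t pcs k := by
    intro k hk
    simp [pvIsP, List.getD_eq_getElem?_getD, List.getElem?_append_left hk]
  induction j with
  | zero => simp only [pvLast, hIs 0 h]
  | succ k ih =>
    simp only [pvLast, hIs (k+1) h, ih (by omega)]

theorem pvScan_zipIdx (pcs : List (List Char)) (t : List Char) :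
    pvScan pcs (-1) t.zipIdx = (List.range t.length).map (pvLast t pcs) := by
  induction t using List.reverseRecOn with
  | nil => simp [pvScan]
  | append_singleton t c ih =>
    have hz : (t ++ [c]).zipIdx = t.zipIdx ++ [(c, t.length)] := by
      rw [List.zipIdx_append]; simp [List.zipIdx]
    rw [hz, pvScan_append, ih]
    have hlen : (t ++ [c]).length = t.length + 1 := by simp
    rw [hlen, List.range_succ, List.map_append]
    congr 1
    · exact List.map_congr_left (fun j hj => (pvLast_append t c pcs j (List.mem_range.mp hj)).symm)
    · have hgd : (t ++ [c]).getD t.length ' ' = c := by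
        simp [List.getD_eq_getElem?_getD]
      cases ht : t.length with
      | zero =>
        have ht0 : t = [] := List.length_eq_zero_iff.mp ht
        subst ht0
        simp [pvLast, pvIsP]
      | succ n =>
        rw [ht] at hgd
        have hApp : pvLast (t ++ [c]) pcs n = pvLast t pcs n :=
          pvLast_append t c pcs n (by omega)
        have hgl : ((List.range (n+1)).map (pvLast t pcs)).getLastD (-1) = pvLast t pcs n := by
          simp [List.range_succ]
        have hstep : pvLast (t ++ [c]) pcs (n+1) =
            if pcs.contains [(t ++ [c]).getD (n+1) ' '] = true then ((n : Int)+1)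
            else pvLast (t ++ [c]) pcs n := rfl
        simp only [List.map_cons, List.map_nil]
        rw [hstep, hgd, hApp, hgl]
        simp

theorem pvB_prev_eq (t : List Char) (pcs : List (List Char)) :
    pvB_prev t pcs = (List.range t.length).map (pvLast t pcs) := by
  have hfold : pvB_prev t pcs = pvScan pcs (-1) t.zipIdx := by
    unfold pvB_prev
    rw [pvB_prev_foldl pcs t.zipIdx [] (-1)]
    simp
  rw [hfold, pvScan_zipIdx]

theorem pvB_prev_getD (t : List Char) (pcs : List (List Char)) (j : Nat) (h : j < t.length) :
    (pvB_prev t pcs).getD j (-1) = pvLast t pcs j := by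
  rw [pvB_prev_eq, List.getD_eq_getElem?_getD, List.getElem?_map]
  simp [h]

-- the cuts loop only appends to its accumulator
theorem pvB_cuts_acc (t : List Char) (prev : List Int) (ml : Int) :
    ∀ (fuel cur : Nat) (acc : List (Nat × Int)),
      pvB_cuts t prev ml fuel cur acc =
        (acc ++ (pvB_cuts t prev ml fuel cur []).1, (pvB_cuts t prev ml fuel cur []).2) := by
  intro fuel
  induction fuel with
  | zero => intro cur acc; simp [pvB_cuts]
  | succ fuel ih =>
    intro cur acc
    simp only [pvB_cuts]
    by_cases h1 : cur < t.length
    · simp only [if_pos h1]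
      by_cases h2 : (t.length : Int) ≤ (cur : Int) + ml
      · simp [h2]
      · simp only [if_neg h2]
        by_cases h3 : (cur : Int) ≤ prev.getD (((cur : Int) + ml - 1).toNat) (-1)
        · simp only [if_pos h3]
          rw [ih _ (acc ++ _), ih _ ([] ++ _)]
          simp
        · simp only [if_neg h3]
          rw [ih _ (acc ++ _), ih _ ([] ++ _)]
          simp
    · simp [h1]

-- A's guarded append, filtered, equals appending B's cleaned segment, filtered
theorem pvPush_clean (pcs : List (List Char)) (segs : List (List Char)) (s0 : List Char) :
    (pvA_push pcs segs s0).filter (fun s => !s.isEmpty) =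
      segs.filter (fun s => !s.isEmpty) ++ [pvClean pcs s0].filter (fun s => !s.isEmpty) := by
  unfold pvA_push pvClean
  by_cases h1 : PySem.Chars.strip s0 = []
  · simp [h1, List.filter]
  · simp only [h1]
    set s2 := (match (PySem.Chars.strip s0).getLast? with
      | some c => if pcs.contains [c] then PySem.Chars.strip (PySem.Chars.strip s0).dropLast
                  else PySem.Chars.strip s0
      | none => PySem.Chars.strip s0) with hs2
    by_cases h2 : s2 = []
    · simp [h2, List.filter]
    · have hne : s2.isEmpty = false := by simpa [List.isEmpty_iff] using h2
      simp [h2, List.filter_append, List.filter, hne]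

-- main invariant: A's fused loop, filtered, equals the cleaned/filtered slices of
-- B's cut list followed by the cleaned tail at B's final position
theorem pv_main (t : List Char) (pcs : List (List Char)) (ml : Int) (hml : 1 ≤ ml) :
    ∀ (fuel cur : Nat) (segs : List (List Char)),
      cur < t.length → t.length - cur < fuel →
      (pvA_loop t pcs ml fuel cur segs).filter (fun s => !s.isEmpty) =
        segs.filter (fun s => !s.isEmpty) ++
          (((pvB_cuts t (pvB_prev t pcs) ml fuel cur []).1.map
              (fun ab => pvClean pcs (PySem.List.slice t (some (ab.1 : Int)) (some ab.2)))) ++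
            [PySem.Chars.strip (pvCutPunct pcs (t.drop (pvB_cuts t (pvB_prev t pcs) ml fuel cur []).2))]).filter
            (fun s => !s.isEmpty) := by
  intro fuel
  induction fuel with
  | zero => intro cur segs h1 h2; omega
  | succ fuel ih =>
    intro cur segs hcur hfuel
    simp only [pvA_loop, pvB_cuts, if_pos hcur]
    by_cases hend : (t.length : Int) ≤ (cur : Int) + ml
    · -- window reaches the end: A emits the tail, B stops with no further cut
      have hEe : (min ((cur : Int) + ml) (t.length : Int)).toNat = t.length := by
        rw [min_eq_right hend]; omega
      rw [if_pos hEe, if_pos hend]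
      simp only [List.map_nil, List.nil_append]
      rw [PySem.List.slice_from_natCast, List.filter_append]
    · have hEe : (min ((cur : Int) + ml) (t.length : Int)).toNat ≠ t.length := by
        rw [min_eq_left (by omega)]; omega
      rw [if_neg hEe, if_neg hend]
      have hEpos : cur < (min ((cur : Int) + ml) (t.length : Int)).toNat := by
        rw [min_eq_left (by omega)]; omega
      have hidx : (min ((cur : Int) + ml) (t.length : Int)).toNat - 1 = (((cur : Int) + ml - 1)).toNat := by
        rw [min_eq_left (by omega)]; omega
      have hlt : (((cur : Int) + ml - 1)).toNat < t.length := by omega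
      have hFS := pvA_findSplit_eq t pcs cur _ hEpos
      rw [hidx] at hFS
      rw [pvB_prev_getD t pcs _ hlt]
      set L := pvLast t pcs (((cur : Int) + ml - 1)).toNat with hL
      have hLle : L ≤ (cur : Int) + ml - 1 := by
        have := pvLast_le t pcs (((cur : Int) + ml - 1)).toNat
        omega
      by_cases hle : (cur : Int) ≤ L
      · rw [if_pos hle] at hFS
        rw [if_pos hle]
        have hcast : ((((L.toNat + 1 : Nat)) : Int)) - 1 = L := by omega
        have hcur' : L.toNat + 1 < t.length := by omega
        rw [pvB_cuts_acc t _ ml fuel (L.toNat + 1) ([] ++ [(cur, L)])]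
        simp only [hFS, hcast]
        rw [ih (L.toNat + 1) _ hcur' (by omega), pvPush_clean]
        simp only [List.filter_append, List.filter_cons, List.filter_nil, List.append_assoc]
        split_ifs <;> simp_all [List.filter_cons, List.isEmpty_iff]
      · rw [if_neg hle] at hFS
        rw [if_neg hle]
        have hEn : (min ((cur : Int) + ml) (t.length : Int)).toNat = ((cur : Int) + ml).toNat := by
          rw [min_eq_left (by omega)]
        rw [hEn] at hFS
        have hcast : (((((cur : Int) + ml).toNat) : Int)) = (cur : Int) + ml := by omega
        have hcur' : (((cur : Int) + ml)).toNat < t.length := by omega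
        rw [pvB_cuts_acc t _ ml fuel (((cur : Int) + ml).toNat) ([] ++ [(cur, (cur : Int) + ml)])]
        simp only [hFS, hEn, hcast]
        rw [ih _ _ hcur' (by omega), pvPush_clean]
        simp only [List.filter_append, List.filter_cons, List.filter_nil, List.append_assoc]
        split_ifs <;> simp_all [List.filter_cons, List.isEmpty_iff]

-- ===== VERDICT (by name: the statement is the Claim_ definition above) =====
theorem greedy_text_splitter_spec : Claim_equal_greedy_text_splitter := by
  intro text ml punct _hdom hpre
  unfold Spec_greedy_text_splitter greedy_text_splitter greedy_text_splitter_alt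
  by_cases h0 : text.toList = []
  · simp [h0]
  · simp only [if_neg h0]
    by_cases h1 : ((PySem.Chars.strip text.toList).length : Int) ≤ ml
    · simp [h1]
    · simp only [if_neg h1]
      cases hpre with
      | inl hml =>
        have hn : 0 < (PySem.Chars.strip text.toList).length := by
          by_contra hz
          have : (PySem.Chars.strip text.toList).length = 0 := by omega
          rw [this] at h1
          exact h1 (by push_cast; omega)
        have := pv_main (PySem.Chars.strip text.toList)
          ((if punct.isEmpty then pvDefaultPunct else punct).map String.toList) ml hml
          ((PySem.Chars.strip text.toList).length + 1) 0 [] hn (by omega)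
        simp only [List.filter_nil, List.nil_append] at this
        rw [this, List.filter_append]
      | inr hnil =>
        rw [hnil]
        rfl
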